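-- pv_equiv track=rewrite | github.com/MaoMao-ai/Symbolic-Regression | Prefix_Seq_VAE.py | is_valid_prefix
-- ===== SOURCE A (Python) =====
-- def is_valid_prefix(expression):
--     """Checks if the given prefix expression is valid."""
--     stack = []
--     operators = {'+', '-', '*', '/', '^'}
--
--     for token in reversed(expression):
--         if token in operators:
--             if len(stack) < 2:
--                 return False  # Not enough operands
--             stack.pop()
--             stack.pop()
--             stack.append("expr")  # Replace two operands with one valid expression
--         else:
--             stack.append(token)
--
--     return len(stack) == 1
-- ===== SOURCE B (Python) =====
-- def is_valid_prefix(expression):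
--     """Checks if the given prefix expression is valid (forward slot counter)."""
--     operators = {'+', '-', '*', '/', '^'}
--     need = 1  # unfilled operand slots
--     for token in expression:
--         if need <= 0:
--             return False  # extra tokens after a complete expression
--         need -= 1
--         if token in operators:
--             need += 2
--     return need == 0
-- ===== Notes on version B (the rewrite author's own statement) =====
-- stated objective: simpler
-- what changed: Replaced the reversed-traversal stack simulation with a forward single pass maintaining one integer (number of unfilled operand slots): need starts at 1, each token fills a slot, each operator opens two; valid iff need never hits zero early and ends at zero.
import Mathlib
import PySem

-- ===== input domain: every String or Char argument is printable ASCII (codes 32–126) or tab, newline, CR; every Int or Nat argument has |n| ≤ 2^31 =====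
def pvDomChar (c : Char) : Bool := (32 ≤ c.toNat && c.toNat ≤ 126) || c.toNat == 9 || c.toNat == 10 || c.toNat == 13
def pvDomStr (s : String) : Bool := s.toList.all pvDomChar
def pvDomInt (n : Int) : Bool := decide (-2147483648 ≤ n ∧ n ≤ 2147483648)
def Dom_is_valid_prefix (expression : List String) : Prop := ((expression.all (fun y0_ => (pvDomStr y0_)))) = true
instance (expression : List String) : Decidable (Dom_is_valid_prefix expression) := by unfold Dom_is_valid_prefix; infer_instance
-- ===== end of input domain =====

-- B replaces A's reversed-traversal stack simulation by a forward single pass over one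
-- integer counter (unfilled operand slots); same return value, O(1) auxiliary space.

-- ===== PORT A =====
-- Python's operator set {'+','-','*','/','^'}; only membership is used
def pvOps : List String := ["+", "-", "*", "/", "^"]

-- the for-loop over reversed(expression): stack with head as top; `none` models the
-- early `return False`; pop/pop/append "expr" becomes dropping two and consing "expr"
def pvALoop : List String → List String → Option (List String)
  | [], stack => some stack
  | token :: rest, stack =>
      if pvOps.contains token then
        if stack.length < 2 then none
        else pvALoop rest ("expr" :: stack.drop 2)
      else pvALoop rest (token :: stack)

def is_valid_prefix (expression : List String) : Bool :=
  match pvALoop expression.reverse [] with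
  | none => false
  | some stack => stack.length == 1

-- ===== PORT B =====
-- forward pass: need = number of unfilled operand slots
def pvBLoop : Int → List String → Bool
  | need, [] => need == 0
  | need, token :: rest =>
      if need ≤ 0 then false
      else pvBLoop (need - 1 + (if pvOps.contains token then 2 else 0)) rest

def is_valid_prefix_alt (expression : List String) : Bool :=
  pvBLoop 1 expression

-- ===== PRECONDITION & SPEC =====
def Spec_is_valid_prefix (expression : List String) (out : Bool) : Prop := out = is_valid_prefix_alt expression
instance (expression : List String) (out : Bool) : Decidable (Spec_is_valid_prefix expression out) := by unfold Spec_is_valid_prefix; infer_instance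

-- ===== CLAIM (what is proved, stated in full; the proofs are below) =====
def Claim_equal_is_valid_prefix : Prop := ∀ (expression : List String), Dom_is_valid_prefix expression → Spec_is_valid_prefix expression (is_valid_prefix expression)

-- ===== LEMMAS AND PROOFS =====

theorem pvALoop_append (l1 l2 s : List String) :
    pvALoop (l1 ++ l2) s = (pvALoop l1 s).bind (fun s' => pvALoop l2 s') := by
  induction l1 generalizing s with
  | nil => simp [pvALoop]
  | cons t rest ih =>
      simp only [List.cons_append, pvALoop]
      split_ifs with h1 h2
      · simp
      · exact ih _
      · exact ih _

-- key invariant: the forward counter run from `need` over `l` succeeds exactly when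
-- A's reversed-stack run over `l` ends with a stack of exactly `need` entries
theorem pvLoop_eq (l : List String) : ∀ need : Int,
    pvBLoop need l =
      (match pvALoop l.reverse [] with
       | none => false
       | some s => decide ((s.length : Int) = need)) := by
  induction l with
  | nil =>
      intro need
      show (need == 0) = decide ((0 : Int) = need)
      rw [Bool.eq_iff_iff]
      simp only [beq_iff_eq, decide_eq_true_eq]
      omega
  | cons t rest ih =>
      intro need
      rw [show (t :: rest).reverse = rest.reverse ++ [t] by simp, pvALoop_append]
      by_cases hop : pvOps.contains t = true
      · have hB : pvBLoop need (t :: rest) =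
            if need ≤ 0 then false else pvBLoop (need - 1 + 2) rest := by
          have hop' : t ∈ pvOps := by simpa using hop
          simp [pvBLoop, hop']
        rcases hA : pvALoop rest.reverse [] with _ | s
        · rw [hB, Option.bind_none]
          split_ifs with hneed
          · rfl
          · rw [ih, hA]
        · rw [hB, Option.bind_some]
          by_cases hl : s.length < 2
          · have hstep : pvALoop [t] s = none := by
              simp only [pvALoop]
              rw [if_pos hop, if_pos hl]
            rw [hstep]
            split_ifs with hneed
            · rfl
            · rw [ih, hA]
              simp only [decide_eq_false_iff_not]
              omega
          · have hstep : pvALoop [t] s = some ("expr" :: s.drop 2) := by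
              simp only [pvALoop]
              rw [if_pos hop, if_neg hl]
            rw [hstep]
            split_ifs with hneed
            · symm
              simp only [List.length_cons, List.length_drop, decide_eq_false_iff_not]
              omega
            · rw [ih, hA]
              simp only [List.length_cons, List.length_drop, decide_eq_decide]
              omega
      · have hB : pvBLoop need (t :: rest) =
            if need ≤ 0 then false else pvBLoop (need - 1 + 0) rest := by
          have hop' : t ∉ pvOps := by simpa using hop
          simp [pvBLoop, hop']
        rcases hA : pvALoop rest.reverse [] with _ | s
        · rw [hB, Option.bind_none]
          split_ifs with hneed
          · rfl
          · rw [ih, hA]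
        · rw [hB, Option.bind_some]
          have hstep : pvALoop [t] s = some (t :: s) := by
            simp only [pvALoop]
            rw [if_neg hop]
          rw [hstep]
          split_ifs with hneed
          · symm
            simp only [List.length_cons, decide_eq_false_iff_not]
            omega
          · rw [ih, hA]
            simp only [List.length_cons, decide_eq_decide]
            omega

-- ===== VERDICT (by name: the statement is the Claim_ definition above) =====
theorem is_valid_prefix_spec : Claim_equal_is_valid_prefix := by
  intro e _
  unfold Spec_is_valid_prefix is_valid_prefix is_valid_prefix_alt
  rw [pvLoop_eq]
  rcases h : pvALoop e.reverse [] with _ | s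
  · rfl
  · have : (s.length == 1) = decide ((s.length : Int) = (1 : Int)) := by
      rw [Bool.eq_iff_iff]
      simp only [beq_iff_eq, decide_eq_true_eq]
      omega
    exact this
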